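-- pv_equiv track=rewrite | github.com/iridescent99/codeforces | 1000/unfinished/2144B/main.py | max_cost_permutation
-- ===== SOURCE A (Python) =====
-- import math
--
-- def max_cost_permutation(n, p):
--     start = math.inf
--     end = -math.inf
--     available_digits = [i for i in range(0, n+1) if i not in p]
--     for i in range(n):
--         if p[i] == 0 and available_digits[0] != i+1:
--             start = min(start, i)
--             end = max(end, i)
--         elif p[i] != i+1 and p[i] != 0:
--             start = min(start, i)
--             end = max(end, i)
--     if start < math.inf and end > -math.inf:
--         return end-start+1
--     return 0
-- ===== SOURCE B (Python) =====
-- def max_cost_permutation(n, p):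
--     # Presence table for digits 0..n, then two directional scans with early exit:
--     # first misplaced index from the left, last misplaced index from the right.
--     if n <= 0:
--         return 0
--     seen = [False] * (n + 2)
--     for v in p:
--         if 0 <= v <= n:
--             seen[v] = True
--     m = 0                      # smallest digit of 0..n+1 absent from p
--     while seen[m]:
--         m += 1
--     lo = 0
--     while lo < n and (p[lo] == lo + 1 or (p[lo] == 0 and m == lo + 1)):
--         lo += 1
--     if lo >= n:
--         return 0
--     hi = n - 1
--     while p[hi] == hi + 1 or (p[hi] == 0 and m == hi + 1):
--         hi -= 1
--     return hi - lo + 1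
-- ===== Notes on version B (the rewrite author's own statement) =====
-- stated objective: faster
-- what changed: A materialises the sorted list of all missing digits by scanning p for every candidate in 0..n (quadratic) and sweeps all n indices accumulating min/max with float-infinity sentinels; B fills a boolean presence table in one pass to read off the single smallest missing digit, then runs two opposing early-exit pointer scans (from the left for the first misplaced index, from the right for the last) and never builds a list of mismatches.
import Mathlib
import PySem

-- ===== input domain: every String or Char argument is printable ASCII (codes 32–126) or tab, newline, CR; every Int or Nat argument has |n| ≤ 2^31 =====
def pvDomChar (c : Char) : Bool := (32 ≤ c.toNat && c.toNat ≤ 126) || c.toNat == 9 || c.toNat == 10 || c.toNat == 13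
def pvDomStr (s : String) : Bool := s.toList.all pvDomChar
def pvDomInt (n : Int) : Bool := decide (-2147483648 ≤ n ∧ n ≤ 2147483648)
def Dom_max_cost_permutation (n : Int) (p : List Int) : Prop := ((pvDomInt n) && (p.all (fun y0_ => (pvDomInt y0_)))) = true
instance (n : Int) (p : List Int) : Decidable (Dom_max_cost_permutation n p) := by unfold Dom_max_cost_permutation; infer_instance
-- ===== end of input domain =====

-- B replaces A's quadratic missing-digit list comprehension and its single min/max sweep by a
-- boolean presence table (read off for the smallest missing digit) and two opposing early-exit
-- pointer scans for the first and last misplaced index; measured asymptotically faster.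

-- ===== PORT A =====
-- A's float sentinels start = math.inf / end = -math.inf are ported as Option Int (none = the
-- sentinel is still in place); min(start, i) / max(end, i) become: none ↦ i, some s ↦ min s i.
-- This is exact: min(inf, i) = i, max(-inf, i) = i, and after the first update only ints occur.
def pvUpd (se : Option Int × Option Int) (i : Int) : Option Int × Option Int :=
  ((match se.1 with | none => some i | some s => some (min s i)),
   (match se.2 with | none => some i | some e => some (max e i)))

def pvLoopA (p : List Int) (a0 : Int) (se : Option Int × Option Int) (i : Int) :
    Option Int × Option Int :=
  let pi := (PySem.List.pyGet? p i).getD 0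
  if pi == 0 && !(a0 == i + 1) then pvUpd se i
  else if !(pi == i + 1) && !(pi == 0) then pvUpd se i
  else se

def max_cost_permutation (n : Int) (p : List Int) : Int :=
  let available := (PySem.List.pyRange 0 (n+1) 1).filter (fun i => !p.contains i)
  -- available_digits[0]: pyGet? is none exactly where Python raises IndexError (outside Pre_)
  let a0 := (PySem.List.pyGet? available 0).getD 0
  match (PySem.List.pyRange 0 n 1).foldl (pvLoopA p a0) (none, none) with
  | (some s, some e) => e - s + 1
  | _ => 0

-- ===== PORT B =====
-- good index test: p[i] == i+1 or (p[i] == 0 and m == i+1)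
def pvGoodB (p : List Int) (m : Int) (i : Int) : Bool :=
  let pi := (PySem.List.pyGet? p i).getD 0
  (pi == i + 1) || (pi == 0 && m == i + 1)

-- 'm = 0; while seen[m]: m += 1' as a structural walk over the seen table (the walk stopping at
-- the end of the list corresponds to the out-of-range index Python would raise on; under Pre_
-- the table always holds a false entry, so this case is never reached).
def pvSkipTrue : List Bool → Int → Int
  | [], m => m
  | b :: t, m => if b then pvSkipTrue t (m + 1) else m

-- 'while lo < n and good(lo): lo += 1'
def pvFindLo (p : List Int) (m n : Int) (i : Int) : Int :=
  if _h : i < n then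
    if pvGoodB p m i then pvFindLo p m n (i + 1) else i
  else i
termination_by (n - i).toNat
decreasing_by omega

-- 'hi = n-1; while good(hi): hi -= 1'; the 0 ≤ hi guard only makes the recursion total: the loop
-- is entered only when a misplaced index ≥ 0 exists below hi, so the guard never fires on Pre_.
def pvFindHi (p : List Int) (m : Int) (hi : Int) : Int :=
  if _h : 0 ≤ hi then
    if pvGoodB p m hi then pvFindHi p m (hi - 1) else hi
  else hi
termination_by (hi + 1).toNat
decreasing_by omega

def max_cost_permutation_alt (n : Int) (p : List Int) : Int :=
  if n ≤ 0 then 0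
  else
    let seen := p.foldl (fun s v => if 0 ≤ v ∧ v ≤ n then s.set v.toNat true else s)
                        (List.replicate (n + 2).toNat false)
    let m := pvSkipTrue seen 0
    let lo := pvFindLo p m n 0
    if n ≤ lo then 0
    else pvFindHi p m (n - 1) - lo + 1

-- ===== PRECONDITION & SPEC =====
-- Pre_ excludes exactly the inputs where Python A raises: n > len(p) (IndexError on p[i]) and
-- the case where some p[i] == 0 while every digit of 0..n occurs in p (IndexError on
-- available_digits[0], the empty list).
def Pre_max_cost_permutation (n : Int) (p : List Int) : Prop :=
  n ≤ (p.length : Int) ∧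
    ((0 : Int) ∈ p.take n.toNat → ∃ d ∈ PySem.List.pyRange 0 (n+1) 1, d ∉ p)
instance (n : Int) (p : List Int) : Decidable (Pre_max_cost_permutation n p) := by
  unfold Pre_max_cost_permutation; infer_instance

def pvWitness_max_cost_permutation : Int × List Int := (3, [2, 1, 3])

def Spec_max_cost_permutation (n : Int) (p : List Int) (out : Int) : Prop := out = max_cost_permutation_alt n p
instance (n : Int) (p : List Int) (out : Int) : Decidable (Spec_max_cost_permutation n p out) := by unfold Spec_max_cost_permutation; infer_instance

-- ===== CLAIM (what is proved, stated in full; the proofs are below) =====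
def Claim_equal_max_cost_permutation : Prop := ∀ (n : Int) (p : List Int), Dom_max_cost_permutation n p → Pre_max_cost_permutation n p → Spec_max_cost_permutation n p (max_cost_permutation n p)

-- ===== LEMMAS AND PROOFS =====

-- A's bad-index predicate (the two mismatch branches of its loop), used as the common reference.
def pvPredB (p : List Int) (m : Int) (i : Int) : Bool :=
  let pi := (PySem.List.pyGet? p i).getD 0
  (pi == 0 && !(m == i + 1)) || (!(pi == 0) && !(pi == i + 1))

lemma pvGoodB_not (p : List Int) (m i : Int) (hi : 0 ≤ i) :
    (!pvGoodB p m i) = pvPredB p m i := by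
  simp only [pvGoodB, pvPredB]
  set pi := (PySem.List.pyGet? p i).getD 0 with hpi
  cases hb0 : (pi == 0) <;> cases hb1 : (pi == i + 1) <;> cases hb2 : (m == i + 1) <;>
    simp only [Bool.not_true, Bool.not_false, Bool.true_and, Bool.false_and, Bool.and_true,
      Bool.and_false, Bool.true_or, Bool.false_or, Bool.or_true, Bool.or_false] <;>
    first
      | rfl
      | (rw [beq_iff_eq] at hb0 hb1; omega)

lemma pvLoopA_eq (p : List Int) (a0 : Int) (se : Option Int × Option Int) (i : Int) :
    pvLoopA p a0 se i = if pvPredB p a0 i then pvUpd se i else se := by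
  simp only [pvLoopA, pvPredB]
  by_cases h0 : ((PySem.List.pyGet? p i).getD 0 == 0) = true <;>
    by_cases h1 : (a0 == i + 1) = true <;>
      by_cases h2 : ((PySem.List.pyGet? p i).getD 0 == i + 1) = true <;>
        simp [h0, h1, h2]

lemma pv_fold (q : Int → Bool) (l : List Int) (h : l.Pairwise (· < ·)) :
    l.foldl (fun se i => if q i then pvUpd se i else se) (none, none) =
      ((l.filter q).head?, (l.filter q).getLast?) := by
  induction l using List.reverseRecOn with
  | nil => simp
  | append_singleton l x ih =>
    have hp : l.Pairwise (· < ·) := (List.pairwise_append.mp h).1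
    have hlt : ∀ y ∈ l, y < x := by
      intro y hy
      exact (List.pairwise_append.mp h).2.2 y hy x (by simp)
    rw [List.foldl_append, ih hp, List.filter_append]
    simp only [List.foldl_cons, List.foldl_nil]
    by_cases hq : q x = true
    · simp only [List.filter_cons, hq, if_true, List.filter_nil]
      cases hF : l.filter q with
      | nil => simp [pvUpd]
      | cons a t =>
        have ha : a ∈ l := List.mem_of_mem_filter (hF ▸ List.mem_cons_self)
        have hax : a < x := hlt a ha
        have hgl : (a :: t).getLast (List.cons_ne_nil a t) ∈ l := by
          have : (a :: t).getLast (List.cons_ne_nil a t) ∈ l.filter q := by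
            rw [hF]; exact List.getLast_mem _
          exact List.mem_of_mem_filter this
        have hglx : (a :: t).getLast (List.cons_ne_nil a t) < x := hlt _ hgl
        simp [pvUpd, List.getLast?_eq_some_getLast (l := a :: t) (List.cons_ne_nil a t),
          min_eq_left hax.le, max_eq_right hglx.le]
        rw [show a :: (t ++ [x]) = (a :: t) ++ [x] from rfl, List.getLast?_concat]
    · simp [hq]

lemma pv_pyGet_val (p : List Int) (i : Int) (h0 : 0 ≤ i) (h : i < (p.length : Int))
    (hl : i.toNat < p.length) : PySem.List.pyGet? p i = some p[i.toNat] := by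
  simp [PySem.List.pyGet?, PySem.List.pyIdx?, h0, h]

-- characterisation of pvSkipTrue: start + length of the leading run of 'true'
lemma pvSkipTrue_eq (s : List Bool) : ∀ m : Int,
    pvSkipTrue s m = m + ((s.takeWhile id).length : Int) := by
  induction s with
  | nil => intro m; simp [pvSkipTrue]
  | cons b t ih =>
    intro m
    by_cases hb : b = true
    · simp [pvSkipTrue, hb, ih, List.takeWhile_cons]; ring
    · simp at hb
      simp [pvSkipTrue, hb, List.takeWhile_cons]

-- the leading run of trues: everything before is true, the entry right after is false
lemma pv_takeWhile_spec (s : List Bool) :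
    (∀ j < (s.takeWhile id).length, s[j]? = some true) ∧
      ((s.takeWhile id).length < s.length → s[(s.takeWhile id).length]? = some false) := by
  induction s with
  | nil => simp
  | cons b t ih =>
    by_cases hb : b = true
    · refine ⟨?_, ?_⟩
      · intro j hj
        simp only [List.takeWhile_cons, hb, id, if_true, List.length_cons] at hj
        cases j with
        | zero => simp [hb]
        | succ k =>
          simp only [List.getElem?_cons_succ]
          exact ih.1 k (by omega)
      · intro hlt
        simp only [List.takeWhile_cons, hb, id, if_true, List.length_cons] at hlt ⊢
        simp only [List.getElem?_cons_succ]
        exact ih.2 (by omega)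
    · simp at hb
      refine ⟨?_, ?_⟩
      · intro j hj; simp [List.takeWhile_cons, hb] at hj
      · intro _; simp [List.takeWhile_cons, hb]

-- the presence table: entry k records 'k occurs in p and k ≤ n'
lemma pv_seen_get (n : Int) (l : List Int) : ∀ (s : List Bool) (k : Nat) (hk : k < s.length),
    (l.foldl (fun s v => if 0 ≤ v ∧ v ≤ n then s.set v.toNat true else s) s)[k]? =
      some (s[k] || decide ((k : Int) ∈ l ∧ (k : Int) ≤ n)) := by
  induction l with
  | nil => intro s k hk; simp [hk]
  | cons v t ih =>
    intro s k hk
    simp only [List.foldl_cons]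
    by_cases hc : 0 ≤ v ∧ v ≤ n
    · have hlen : (s.set v.toNat true).length = s.length := by simp
      rw [if_pos hc, ih (s.set v.toNat true) k (by omega)]
      congr 1
      rw [List.getElem_set]
      by_cases hvk : v.toNat = k
      · have hv : v = (k : Int) := by omega
        have hkn : (k : Int) ≤ n := by omega
        simp [hvk, hv, hkn, List.mem_cons]
      · have hne : v ≠ (k : Int) := by omega
        simp [hvk, List.mem_cons, hne, Ne.symm hne]
    · rw [if_neg hc, ih s k hk]
      congr 1
      by_cases hkn : (k : Int) ≤ n
      · have hne : v ≠ (k : Int) := by omega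
        simp [List.mem_cons, hne, Ne.symm hne, hkn]
      · simp [hkn]

-- pvFindLo computes the first misplaced index in [i, n), or n if there is none
lemma pvFindLo_eq (p : List Int) (m n : Int) : ∀ (i : Int), i ≤ n →
    pvFindLo p m n i =
      (((PySem.List.pyRange i n 1).filter (fun j => !pvGoodB p m j)).head?).getD n := by
  intro i hi
  induction hfuel : (n - i).toNat generalizing i with
  | zero =>
    have hge : n ≤ i := by omega
    have hin : i = n := le_antisymm hi hge
    rw [pvFindLo, dif_neg (by omega : ¬ i < n), PySem.List.pyRange_one_eq_nil hge]
    simp [hin]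
  | succ k ihk =>
    have hlt : i < n := by omega
    rw [pvFindLo, dif_pos hlt, PySem.List.pyRange_one_cons hlt, List.filter_cons]
    by_cases hg : pvGoodB p m i = true
    · rw [if_pos hg]
      simp only [hg, Bool.not_true, Bool.false_eq_true, if_false]
      exact ihk (i + 1) (by omega) (by omega)
    · have hb : (!pvGoodB p m i) = true := by simp [hg]
      rw [if_neg hg, hb, if_pos rfl]
      simp

-- pvFindHi computes the last misplaced index in [0, hi], or -1 if there is none
lemma pvFindHi_eq (p : List Int) (m : Int) : ∀ (hi : Int), -1 ≤ hi →
    pvFindHi p m hi =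
      (((PySem.List.pyRange 0 (hi + 1) 1).filter (fun j => !pvGoodB p m j)).getLast?).getD (-1) := by
  intro hi h1
  induction hfuel : (hi + 1).toNat generalizing hi with
  | zero =>
    have : hi = -1 := by omega
    subst this
    rw [pvFindHi, dif_neg (by omega : ¬ (0:Int) ≤ -1), PySem.List.pyRange_one_eq_nil (by omega)]
    norm_num
  | succ k ihk =>
    have h0 : 0 ≤ hi := by omega
    rw [pvFindHi, dif_pos h0, PySem.List.pyRange_one_succ_right h0, List.filter_append,
      List.filter_cons]
    by_cases hg : pvGoodB p m hi = true
    · rw [if_pos hg]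
      simp only [hg, Bool.not_true, Bool.false_eq_true, if_false, List.filter_nil,
        List.append_nil]
      have h := ihk (hi - 1) (by omega) (by omega)
      rw [show hi - 1 + 1 = hi by omega] at h
      exact h
    · have hb : (!pvGoodB p m hi) = true := by simp [hg]
      rw [if_neg hg, hb, if_pos rfl, List.filter_nil, List.getLast?_concat]
      simp

-- the common span shape: distance between first and last index kept by the predicate
def pvSpan (q : Int → Bool) (n : Int) : Int :=
  match ((PySem.List.pyRange 0 n 1).filter q).head?,
        ((PySem.List.pyRange 0 n 1).filter q).getLast? with
  | some s, some e => e - s + 1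
  | _, _ => 0

lemma pvSpan_congr (q q' : Int → Bool) (n : Int)
    (h : ∀ j ∈ PySem.List.pyRange 0 n 1, q j = q' j) : pvSpan q n = pvSpan q' n := by
  unfold pvSpan
  rw [List.filter_congr h]

lemma pvA_span (n : Int) (p : List Int) :
    max_cost_permutation n p =
      pvSpan (pvPredB p ((PySem.List.pyGet?
        ((PySem.List.pyRange 0 (n+1) 1).filter (fun i => !p.contains i)) 0).getD 0)) n := by
  simp only [max_cost_permutation]
  have hfun : pvLoopA p ((PySem.List.pyGet?
      ((PySem.List.pyRange 0 (n+1) 1).filter (fun i => !p.contains i)) 0).getD 0) =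
      fun se i => if pvPredB p ((PySem.List.pyGet?
        ((PySem.List.pyRange 0 (n+1) 1).filter (fun i => !p.contains i)) 0).getD 0) i
        then pvUpd se i else se :=
    funext fun se => funext fun i => pvLoopA_eq p _ se i
  rw [hfun, pv_fold _ _ (PySem.List.pairwise_lt_pyRange_one 0 n)]
  unfold pvSpan
  cases ((PySem.List.pyRange 0 n 1).filter _).head? <;>
    cases ((PySem.List.pyRange 0 n 1).filter _).getLast? <;> rfl

lemma pvB_span (n : Int) (p : List Int) (hn : 0 < n) :
    max_cost_permutation_alt n p =
      pvSpan (fun j => !pvGoodB p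
        (pvSkipTrue (p.foldl (fun s v => if 0 ≤ v ∧ v ≤ n then s.set v.toNat true else s)
          (List.replicate (n + 2).toNat false)) 0) j) n := by
  simp only [max_cost_permutation_alt]
  rw [if_neg (by omega)]
  set M := pvSkipTrue (p.foldl (fun s v => if 0 ≤ v ∧ v ≤ n then s.set v.toNat true else s)
      (List.replicate (n + 2).toNat false)) 0 with hM
  rw [pvFindLo_eq p M n 0 (by omega), pvFindHi_eq p M (n-1) (by omega),
    show n - 1 + 1 = n from by omega]
  unfold pvSpan
  cases hFc : (PySem.List.pyRange 0 n 1).filter (fun j => !pvGoodB p M j) with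
  | nil => simp
  | cons h t =>
    have hhn : h < n := by
      have : h ∈ PySem.List.pyRange 0 n 1 :=
        List.mem_of_mem_filter (hFc ▸ List.mem_cons_self)
      exact ((PySem.List.mem_pyRange_one).mp this).2
    have hgl := List.getLast?_eq_some_getLast (l := h :: t) (List.cons_ne_nil h t)
    simp only [List.head?_cons, Option.getD_some, hgl, if_neg (by omega : ¬ n ≤ h)]

-- foldl over 'set' operations preserves the table length
lemma pv_seen_len (n : Int) (l : List Int) : ∀ s : List Bool,
    (l.foldl (fun s v => if 0 ≤ v ∧ v ≤ n then s.set v.toNat true else s) s).length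
      = s.length := by
  induction l with
  | nil => intro s; rfl
  | cons v t ih =>
    intro s
    simp only [List.foldl_cons]
    by_cases hc : 0 ≤ v ∧ v ≤ n
    · rw [if_pos hc, ih]; simp
    · rw [if_neg hc, ih]

-- what pvSkipTrue computes on the presence table: the least k with ¬(k ∈ p ∧ k ≤ n)
lemma pv_seen_facts (n : Int) (p : List Int) (hn : 0 < n) :
    ∃ L : Nat,
      pvSkipTrue (p.foldl (fun s v => if 0 ≤ v ∧ v ≤ n then s.set v.toNat true else s)
        (List.replicate (n + 2).toNat false)) 0 = (L : Int) ∧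
      (L : Int) ≤ n + 1 ∧
      (∀ j : Nat, j < L → ((j : Int) ∈ p ∧ (j : Int) ≤ n)) ∧
      ¬(((L : Int)) ∈ p ∧ ((L : Int)) ≤ n) := by
  set SEEN := p.foldl (fun s v => if 0 ≤ v ∧ v ≤ n then s.set v.toNat true else s)
      (List.replicate (n + 2).toNat false) with hSEEN
  have hlen : SEEN.length = (n + 2).toNat := by
    rw [hSEEN, pv_seen_len]; simp
  have hget : ∀ k : Nat, k < (n + 2).toNat →
      SEEN[k]? = some (decide ((k : Int) ∈ p ∧ (k : Int) ≤ n)) := by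
    intro k hk
    rw [hSEEN, pv_seen_get n p (List.replicate (n + 2).toNat false) k (by simpa using hk)]
    simp
  obtain ⟨hbefore, hafter⟩ := pv_takeWhile_spec SEEN
  have hLlen : (SEEN.takeWhile id).length ≤ SEEN.length := (List.takeWhile_sublist _).length_le
  have hLlt : (SEEN.takeWhile id).length < SEEN.length := by
    rcases lt_or_eq_of_le hLlen with h | h
    · exact h
    · exfalso
      have hk : (n + 1).toNat < (SEEN.takeWhile id).length := by omega
      have h1 := hbefore _ hk
      rw [hget _ (by omega)] at h1
      simp only [Option.some.injEq] at h1
      have h3 := (of_decide_eq_true h1).2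
      omega
  have hfalse := hafter hLlt
  rw [hget _ (by omega)] at hfalse
  simp only [Option.some.injEq, decide_eq_false_iff_not] at hfalse
  refine ⟨(SEEN.takeWhile id).length, ?_, by omega, ?_, hfalse⟩
  · rw [pvSkipTrue_eq]; omega
  · intro j hj
    have h1 := hbefore j hj
    rw [hget _ (by omega)] at h1
    simp only [Option.some.injEq] at h1
    exact of_decide_eq_true h1

-- the table walk lands on the head of A's available_digits list (the least missing digit)
lemma pv_m_head (n : Int) (p : List Int) (hn : 0 < n) (c : Int) (rest : List Int)
    (hav : (PySem.List.pyRange 0 (n+1) 1).filter (fun i => !p.contains i) = c :: rest) :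
    pvSkipTrue (p.foldl (fun s v => if 0 ≤ v ∧ v ≤ n then s.set v.toNat true else s)
      (List.replicate (n + 2).toNat false)) 0 = c := by
  obtain ⟨L, hL, hLle, hmem, hnot⟩ := pv_seen_facts n p hn
  rw [hL]
  have hcmem : c ∈ (PySem.List.pyRange 0 (n+1) 1).filter (fun i => !p.contains i) :=
    hav ▸ List.mem_cons_self
  rw [List.mem_filter] at hcmem
  obtain ⟨hcr', hcnp'⟩ := hcmem
  rw [PySem.List.mem_pyRange_one] at hcr'
  have hcnp : c ∉ p := by simpa using hcnp'
  have hmin : ∀ x ∈ rest, c < x := by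
    have hpw : ((PySem.List.pyRange 0 (n+1) 1).filter (fun i => !p.contains i)).Pairwise (· < ·) :=
      (PySem.List.pairwise_lt_pyRange_one 0 (n+1)).filter _
    rw [hav, List.pairwise_cons] at hpw
    exact hpw.1
  rcases lt_trichotomy ((L : Int)) c with hlt | heq | hgt
  · exfalso
    have hLnp : (L : Int) ∉ p := fun h => hnot ⟨h, by omega⟩
    have hin : (L : Int) ∈ (PySem.List.pyRange 0 (n+1) 1).filter (fun i => !p.contains i) := by
      rw [List.mem_filter]
      exact ⟨PySem.List.mem_pyRange_one.mpr ⟨by omega, by omega⟩, by simpa using hLnp⟩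
    rw [hav, List.mem_cons] at hin
    rcases hin with h | h
    · omega
    · exact absurd (hmin _ h) (by omega)
  · exact heq
  · exfalso
    have hct : c.toNat < L := by omega
    have hcm := (hmem c.toNat hct).1
    rw [Int.toNat_of_nonneg hcr'.1] at hcm
    exact hcnp hcm

-- when no digit of 0..n is missing, the table walk stops at n+1
lemma pv_m_top (n : Int) (p : List Int) (hn : 0 < n)
    (hav : (PySem.List.pyRange 0 (n+1) 1).filter (fun i => !p.contains i) = []) :
    pvSkipTrue (p.foldl (fun s v => if 0 ≤ v ∧ v ≤ n then s.set v.toNat true else s)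
      (List.replicate (n + 2).toNat false)) 0 = n + 1 := by
  obtain ⟨L, hL, hLle, hmem, hnot⟩ := pv_seen_facts n p hn
  rw [hL]
  have hall : ∀ k : Int, 0 ≤ k → k < n + 1 → k ∈ p := by
    intro k h0 h1
    by_contra hknp
    have hin : k ∈ (PySem.List.pyRange 0 (n+1) 1).filter (fun i => !p.contains i) := by
      rw [List.mem_filter]
      exact ⟨PySem.List.mem_pyRange_one.mpr ⟨h0, h1⟩, by simpa using hknp⟩
    rw [hav] at hin
    simp at hin
  have hLn : ¬ ((L : Int) ≤ n) := fun hLn => hnot ⟨hall _ (by omega) (by omega), hLn⟩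
  omega

-- ===== main equivalence =====
theorem pv_main : ∀ (n : Int) (p : List Int), Pre_max_cost_permutation n p →
    max_cost_permutation n p = max_cost_permutation_alt n p := by
  intro n p hpre
  obtain ⟨hlen, hz⟩ := hpre
  by_cases hn : n ≤ 0
  · unfold max_cost_permutation max_cost_permutation_alt
    rw [PySem.List.pyRange_one_eq_nil hn]
    simp [hn]
  · have hn0 : 0 < n := by omega
    rw [pvA_span, pvB_span n p hn0]
    set M := pvSkipTrue (p.foldl (fun s v => if 0 ≤ v ∧ v ≤ n then s.set v.toNat true else s)
        (List.replicate (n + 2).toNat false)) 0 with hM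
    rw [pvSpan_congr (fun j => !pvGoodB p M j) (pvPredB p M) n
      (fun j hj => pvGoodB_not p M j (PySem.List.mem_pyRange_one.mp hj).1)]
    rcases hav : (PySem.List.pyRange 0 (n+1) 1).filter (fun i => !p.contains i)
      with _ | ⟨c, rest⟩
    · have ha0 : (PySem.List.pyGet? ([] : List Int) 0).getD 0 = 0 := by
        simp [PySem.List.pyGet?, PySem.List.pyIdx?]
      rw [ha0, hM, pv_m_top n p hn0 hav]
      -- no digit is missing; by Pre_, no p[i] with i < n is 0, so neither predicate
      -- ever looks at its missing-digit argument
      have hz0 : (0 : Int) ∉ p.take n.toNat := by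
        intro h0
        obtain ⟨d, hd, hnp⟩ := hz h0
        have hin : d ∈ (PySem.List.pyRange 0 (n+1) 1).filter (fun i => !p.contains i) := by
          rw [List.mem_filter]
          exact ⟨hd, by simpa using hnp⟩
        rw [hav] at hin
        simp at hin
      apply pvSpan_congr
      intro i hi
      rw [PySem.List.mem_pyRange_one] at hi
      have hilen : i < (p.length : Int) := lt_of_lt_of_le hi.2 hlen
      have hl : i.toNat < p.length := by omega
      have hne : p[i.toNat] ≠ 0 := by
        intro hval
        apply hz0
        have hidx : i.toNat < (p.take n.toNat).length := by
          simp [List.length_take]; omega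
        have hgt : (p.take n.toNat)[i.toNat] = p[i.toNat] := List.getElem_take
        exact hval ▸ hgt ▸ List.getElem_mem hidx
      have hpi : ((PySem.List.pyGet? p i).getD 0 == 0) = false := by
        rw [pv_pyGet_val p i hi.1 hilen hl]
        simpa using hne
      simp [pvPredB, hpi]
    · have ha0 : (PySem.List.pyGet? (c :: rest) 0).getD 0 = c := by
        simp [PySem.List.pyGet?, PySem.List.pyIdx?]
      rw [ha0, hM, pv_m_head n p hn0 c rest hav]

-- ===== VERDICT (by name: the statement is the Claim_ definition above) =====
theorem max_cost_permutation_spec : Claim_equal_max_cost_permutation := by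
  intro n p _ hpre
  unfold Spec_max_cost_permutation
  exact pv_main n p hpre
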